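-- pv_equiv track=rewrite | github.com/Corentin-k/Tetris | Fonction.py | etat_col
-- ===== SOURCE A (Python) =====
-- def etat_col(grille):
--     # Changement de tous les 2 de la colonne en 1 pour supprimer les pions
--     etatcol = True
--     col = []
--     for i in range(1, len(grille[1])-1):
--         for y in range(1, len(grille)-1):
--             if grille[y][i] == "1":
--                 etatcol = False
--         if etatcol is True and i not in col:
--             col.append(i)  # Liste qui contient toutes les colonnes qui ne comportent pas de "1"
--         etatcol = True
--
--     return col
-- ===== SOURCE B (Python) =====
-- def etat_col(grille):
--     cols = len(grille[1])
--     rows = len(grille)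
--     occupied = set()
--     for y in range(1, rows - 1):
--         for i in range(1, cols - 1):
--             if grille[y][i] == "1":
--                 occupied.add(i)
--     return [i for i in range(1, cols - 1) if i not in occupied]
-- ===== Notes on version B (the rewrite author's own statement) =====
-- stated objective: alternative
-- what changed: One pass over all interior cells builds a set of the columns containing a '1'; the result is then a single comprehension over the column range, replacing A's per-column flag reset and its linear 'i not in col' membership scan.
import Mathlib
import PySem

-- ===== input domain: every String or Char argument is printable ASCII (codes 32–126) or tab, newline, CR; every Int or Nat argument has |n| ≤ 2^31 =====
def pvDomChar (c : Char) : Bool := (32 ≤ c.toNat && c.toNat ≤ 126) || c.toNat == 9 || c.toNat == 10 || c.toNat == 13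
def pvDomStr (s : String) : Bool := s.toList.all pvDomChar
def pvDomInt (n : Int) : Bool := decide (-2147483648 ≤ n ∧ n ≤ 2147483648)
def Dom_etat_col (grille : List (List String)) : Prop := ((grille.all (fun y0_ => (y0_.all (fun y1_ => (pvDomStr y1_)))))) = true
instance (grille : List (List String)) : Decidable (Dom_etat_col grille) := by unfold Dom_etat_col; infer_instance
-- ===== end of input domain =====

-- the cell access grille[y][i] both ports perform (helper; exact via PySem.List.pyGetD under Pre_)
def pvCell (grille : List (List String)) (y i : Int) : String :=
  PySem.List.pyGetD (PySem.List.pyGetD grille y []) i ""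

-- B replaces A's per-column flag scan (with its linear 'i not in col' test) by one pass
-- over the interior cells collecting the occupied columns in a set, then one comprehension.
-- ===== PORT A =====
def etat_col (grille : List (List String)) : List Int :=
  (((PySem.List.pyRange 1 (((PySem.List.pyGetD grille 1 []).length : Int) - 1) 1).foldl
    (fun (st : Bool × List Int) i =>
      let etatcol :=
        (PySem.List.pyRange 1 ((grille.length : Int) - 1) 1).foldl
          (fun etatcol y => if pvCell grille y i = "1" then false else etatcol)
          st.1
      let col := if etatcol = true ∧ i ∉ st.2 then st.2 ++ [i] else st.2
      (true, col))
    (true, ([] : List Int)))).2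

-- ===== PORT B =====
def etat_col_alt (grille : List (List String)) : List Int :=
  let cols : Int := (PySem.List.pyGetD grille 1 []).length
  let rows : Int := grille.length
  let occupied : PySem.Set Int :=
    (PySem.List.pyRange 1 (rows - 1) 1).foldl
      (fun occ y =>
        (PySem.List.pyRange 1 (cols - 1) 1).foldl
          (fun occ i => if pvCell grille y i = "1" then PySem.Set.add occ i else occ)
          occ)
      PySem.Set.empty
  (PySem.List.pyRange 1 (cols - 1) 1).filter (fun i => !(PySem.Set.contains occupied i))

-- ===== PRECONDITION & SPEC =====
-- Pre_ excludes exactly the inputs where Python A raises IndexError: grids with fewer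
-- than 2 rows (grille[1]), and grids whose interior rows are shorter than the interior
-- column range read from grille[1] requires.
def Pre_etat_col (grille : List (List String)) : Prop :=
  2 ≤ grille.length ∧
  ((grille.getD 1 []).length ≤ 2 ∨
    ∀ row ∈ (grille.drop 1).dropLast, (grille.getD 1 []).length - 1 ≤ row.length)
instance (grille : List (List String)) : Decidable (Pre_etat_col grille) := by
  unfold Pre_etat_col; infer_instance
def pvWitness_etat_col : List (List String) :=
  [["1","1","1"],["1","0","1"],["1","1","1"]]
def Spec_etat_col (grille : List (List String)) (out : List Int) : Prop := out = etat_col_alt grille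
instance (grille : List (List String)) (out : List Int) : Decidable (Spec_etat_col grille out) := by unfold Spec_etat_col; infer_instance

-- ===== CLAIM (what is proved, stated in full; the proofs are below) =====
def Claim_equal_etat_col : Prop := ∀ (grille : List (List String)), Dom_etat_col grille → Pre_etat_col grille → Spec_etat_col grille (etat_col grille)

-- ===== LEMMAS AND PROOFS =====

-- A's inner flag loop computes 'no "1" in this column' (from any start flag b)
lemma flag_foldl (grille : List (List String)) (i : Int) (l : List Int) (b : Bool) :
    l.foldl (fun etatcol y => if pvCell grille y i = "1" then false else etatcol) b
      = (b && l.all (fun y => !(decide (pvCell grille y i = "1")))) := by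
  induction l generalizing b with
  | nil => simp
  | cons y t ih =>
    simp only [List.foldl_cons, List.all_cons, ih]
    by_cases h : pvCell grille y i = "1" <;> simp [h]

-- A's pair-state fold keeps its flag component equal to true; only the list evolves
lemma pairA (grille : List (List String)) (R l acc : List Int) :
    l.foldl
      (fun (st : Bool × List Int) i =>
        let etatcol := R.foldl (fun etatcol y => if pvCell grille y i = "1" then false else etatcol) st.1
        let col := if etatcol = true ∧ i ∉ st.2 then st.2 ++ [i] else st.2
        (true, col))
      (true, acc)
      = (true, l.foldl
          (fun acc i =>
            if (R.foldl (fun etatcol y => if pvCell grille y i = "1" then false else etatcol) true) = true ∧ i ∉ acc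
            then acc ++ [i] else acc)
          acc) := by
  induction l generalizing acc with
  | nil => rfl
  | cons i t ih =>
    rw [List.foldl_cons, List.foldl_cons]
    exact ih _

-- A's outer loop appends exactly the clean columns, in ascending order
lemma outerA (grille : List (List String)) (R l acc : List Int)
    (hnd : l.Nodup) (hacc : ∀ i ∈ l, i ∉ acc) :
    l.foldl
      (fun acc i =>
        if (R.foldl (fun etatcol y => if pvCell grille y i = "1" then false else etatcol) true) = true ∧ i ∉ acc
        then acc ++ [i] else acc)
      acc
      = acc ++ l.filter (fun i => R.all (fun y => !(decide (pvCell grille y i = "1")))) := by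
  induction l generalizing acc with
  | nil => simp
  | cons i t ih =>
    have hi : i ∉ acc := hacc i (by simp)
    have hit : i ∉ t := (List.nodup_cons.mp hnd).1
    simp only [List.foldl_cons, List.filter_cons]
    rw [flag_foldl]
    simp only [Bool.true_and]
    by_cases hc : (R.all (fun y => !(decide (pvCell grille y i = "1")))) = true
    · rw [if_pos ⟨hc, hi⟩,
        ih (acc ++ [i]) hnd.of_cons (by
          intro j hj
          simp only [List.mem_append, List.mem_singleton, not_or]
          exact ⟨hacc j (by simp [hj]), fun h => hit (h ▸ hj)⟩)]
      simp [hc]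
    · rw [if_neg (fun h => hc h.1), ih acc hnd.of_cons (fun j hj => hacc j (by simp [hj]))]
      simp [hc]

-- membership after B's inner loop over one row
lemma innerB (grille : List (List String)) (y : Int) (l : List Int) (occ : PySem.Set Int)
    (x : Int) :
    (x ∈ l.foldl
      (fun occ i => if pvCell grille y i = "1" then PySem.Set.add occ i else occ) occ)
      ↔ x ∈ occ ∨ (x ∈ l ∧ pvCell grille y x = "1") := by
  induction l generalizing occ with
  | nil => simp
  | cons i t ih =>
    simp only [List.foldl_cons, ih, List.mem_cons]
    by_cases h : pvCell grille y i = "1"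
    · simp only [if_pos h, PySem.Set.mem_add]
      constructor
      · rintro ((h1 | rfl) | h2)
        · exact Or.inl h1
        · exact Or.inr ⟨Or.inl rfl, h⟩
        · exact Or.inr ⟨Or.inr h2.1, h2.2⟩
      · rintro (h1 | ⟨(rfl | h2), hx⟩)
        · exact Or.inl (Or.inl h1)
        · exact Or.inl (Or.inr rfl)
        · exact Or.inr ⟨h2, hx⟩
    · simp only [if_neg h]
      constructor
      · rintro (h1 | h2)
        · exact Or.inl h1
        · exact Or.inr ⟨Or.inr h2.1, h2.2⟩
      · rintro (h1 | ⟨(rfl | h2), hx⟩)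
        · exact Or.inl h1
        · exact absurd hx h
        · exact Or.inr ⟨h2, hx⟩

-- membership in B's occupied set
lemma outerB (grille : List (List String)) (rl cl : List Int) (occ : PySem.Set Int) (x : Int) :
    (x ∈ rl.foldl
      (fun occ y => cl.foldl
        (fun occ i => if pvCell grille y i = "1" then PySem.Set.add occ i else occ) occ)
      occ)
      ↔ x ∈ occ ∨ ∃ y ∈ rl, x ∈ cl ∧ pvCell grille y x = "1" := by
  induction rl generalizing occ with
  | nil => simp
  | cons y t ih =>
    simp only [List.foldl_cons, ih, innerB]
    constructor
    · rintro ((h1 | h2) | ⟨y', hy', h3⟩)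
      · exact Or.inl h1
      · exact Or.inr ⟨y, by simp, h2⟩
      · exact Or.inr ⟨y', by simp [hy'], h3⟩
    · rintro (h1 | ⟨y', hy', h3⟩)
      · exact Or.inl (Or.inl h1)
      · rcases List.mem_cons.mp hy' with rfl | hy'
        · exact Or.inl (Or.inr h3)
        · exact Or.inr ⟨y', hy', h3⟩

-- B equals the same filter: a column is kept iff it never entered the occupied set
lemma altB (grille : List (List String)) :
    etat_col_alt grille
      = (PySem.List.pyRange 1 (((PySem.List.pyGetD grille 1 []).length : Int) - 1) 1).filter
          (fun i => (PySem.List.pyRange 1 ((grille.length : Int) - 1) 1).all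
            (fun y => !(decide (pvCell grille y i = "1")))) := by
  simp only [etat_col_alt]
  apply List.filter_congr
  intro i hi
  have hmem : (i ∈ (PySem.List.pyRange 1 ((grille.length : Int) - 1) 1).foldl
      (fun occ y =>
        (PySem.List.pyRange 1 (((PySem.List.pyGetD grille 1 []).length : Int) - 1) 1).foldl
          (fun occ i => if pvCell grille y i = "1" then PySem.Set.add occ i else occ)
          occ)
      PySem.Set.empty)
      ↔ ∃ y ∈ PySem.List.pyRange 1 ((grille.length : Int) - 1) 1, pvCell grille y i = "1" := by
    rw [outerB]
    simp [PySem.Set.empty, hi]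
  by_cases hin : i ∈ (PySem.List.pyRange 1 ((grille.length : Int) - 1) 1).foldl
      (fun occ y =>
        (PySem.List.pyRange 1 (((PySem.List.pyGetD grille 1 []).length : Int) - 1) 1).foldl
          (fun occ i => if pvCell grille y i = "1" then PySem.Set.add occ i else occ)
          occ)
      PySem.Set.empty
  · obtain ⟨y, hy, hc⟩ := hmem.mp hin
    have h1 : PySem.Set.contains ((PySem.List.pyRange 1 ((grille.length : Int) - 1) 1).foldl
        (fun occ y =>
          (PySem.List.pyRange 1 (((PySem.List.pyGetD grille 1 []).length : Int) - 1) 1).foldl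
            (fun occ i => if pvCell grille y i = "1" then PySem.Set.add occ i else occ)
            occ)
        PySem.Set.empty) i = true := by simpa [PySem.Set.contains, PySem.Set.empty] using hin
    rw [h1]
    symm
    refine List.all_eq_false.mpr ⟨y, hy, ?_⟩
    simp [hc]
  · have h1 : PySem.Set.contains ((PySem.List.pyRange 1 ((grille.length : Int) - 1) 1).foldl
        (fun occ y =>
          (PySem.List.pyRange 1 (((PySem.List.pyGetD grille 1 []).length : Int) - 1) 1).foldl
            (fun occ i => if pvCell grille y i = "1" then PySem.Set.add occ i else occ)
            occ)
        PySem.Set.empty) i = false := by simpa [PySem.Set.contains, PySem.Set.empty] using hin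
    rw [h1]
    symm
    simp only [Bool.not_false, List.all_eq_true]
    intro y hy
    have hne : pvCell grille y i ≠ "1" := fun h => hin (hmem.mpr ⟨y, hy, h⟩)
    simp [hne]

-- ===== VERDICT (by name: the statement is the Claim_ definition above) =====
theorem etat_col_spec : Claim_equal_etat_col := by
  intro grille _ _
  unfold Spec_etat_col
  have e1 : etat_col grille
      = (PySem.List.pyRange 1 (((PySem.List.pyGetD grille 1 []).length : Int) - 1) 1).filter
          (fun i => (PySem.List.pyRange 1 ((grille.length : Int) - 1) 1).all
            (fun y => !(decide (pvCell grille y i = "1")))) := by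
    unfold etat_col
    rw [pairA]
    show (PySem.List.pyRange 1 (((PySem.List.pyGetD grille 1 []).length : Int) - 1) 1).foldl _ [] = _
    rw [outerA grille _ _ [] (PySem.List.nodup_pyRange_one 1 _) (by simp)]
    simp
  rw [e1, altB]
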